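-- pv_equiv track=rewrite | github.com/riccardofeingold/Ctrl-World | scripts/experiment_manager.py | assign_gpus
-- ===== SOURCE A (Python) =====
-- def assign_gpus(available_gpus, gpus_per_experiment, experiment_idx):
--     """Assign GPU IDs for an experiment based on available GPUs."""
--     gpu_list = [int(g.strip()) for g in available_gpus.split(',')]
--     start_idx = (experiment_idx * gpus_per_experiment) % len(gpu_list)
--
--     assigned = []
--     for i in range(gpus_per_experiment):
--         gpu_idx = (start_idx + i) % len(gpu_list)
--         assigned.append(gpu_list[gpu_idx])
--
--     return ','.join(map(str, assigned))
-- ===== SOURCE B (Python) =====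
-- def assign_gpus(available_gpus, gpus_per_experiment, experiment_idx):
--     """Assign GPU IDs for an experiment based on available GPUs."""
--     gpu_list = [int(g.strip()) for g in available_gpus.split(',')]
--     n = len(gpu_list)
--     start = (experiment_idx * gpus_per_experiment) % n
--     rotated = gpu_list[start:] + gpu_list[:start]
--     count = max(gpus_per_experiment, 0)
--     q, r = divmod(count, n)
--     assigned = rotated * q + rotated[:r]
--     return ','.join(map(str, assigned))
-- ===== Notes on version B (the rewrite author's own statement) =====
-- stated objective: alternative
-- what changed: Replaces the per-index loop computing (start+i) % len on every step by a closed-form construction: rotate the list once by slicing, then repeat it q times and append the first r elements where q, r = divmod(count, len).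
import Mathlib
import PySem

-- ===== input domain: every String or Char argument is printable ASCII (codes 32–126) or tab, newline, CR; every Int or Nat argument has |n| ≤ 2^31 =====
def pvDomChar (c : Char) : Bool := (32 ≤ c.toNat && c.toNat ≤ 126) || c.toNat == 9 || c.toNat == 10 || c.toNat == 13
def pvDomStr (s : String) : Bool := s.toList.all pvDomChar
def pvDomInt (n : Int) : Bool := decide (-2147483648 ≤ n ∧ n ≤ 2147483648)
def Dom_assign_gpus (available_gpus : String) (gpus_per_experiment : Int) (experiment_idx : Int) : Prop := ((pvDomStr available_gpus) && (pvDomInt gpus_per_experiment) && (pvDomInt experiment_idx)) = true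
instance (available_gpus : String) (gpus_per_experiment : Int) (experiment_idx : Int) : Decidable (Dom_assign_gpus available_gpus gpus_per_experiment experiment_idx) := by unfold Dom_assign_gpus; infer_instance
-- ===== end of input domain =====

-- B replaces A's per-index loop with modular arithmetic by a one-shot rotation (two slices),
-- whole-list repetition and one final slice; same return value on every input where A returns.

-- ===== PORT A =====
-- parse [int(g.strip()) for g in available_gpus.split(',')]; none = some int() raised ValueError
def pvParse_assign_gpus (available_gpus : String) : Option (List Int) :=
  ((PySem.Str.split? available_gpus ",").getD []).mapM
    (fun g => PySem.Int.ofStr? (PySem.Str.strip g))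

def assign_gpus (available_gpus : String) (gpus_per_experiment : Int) (experiment_idx : Int) : String :=
  match pvParse_assign_gpus available_gpus with
  | none => ""  -- Python raises ValueError here; excluded by Pre_
  | some gpu_list =>
    let n : Int := gpu_list.length
    let start_idx := PySem.Int.mod (experiment_idx * gpus_per_experiment) n
    -- for i in range(gpus_per_experiment): assigned.append(gpu_list[(start_idx+i) % n])
    -- the index is always in range (0 ≤ mod < n since n ≥ 1), so pyGetD is exact here
    let assigned := (PySem.List.pyRange 0 gpus_per_experiment 1).foldl
      (fun acc i => acc ++ [PySem.List.pyGetD gpu_list (PySem.Int.mod (start_idx + i) n) 0]) []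
    PySem.Str.join "," (assigned.map PySem.Int.toStr)

-- ===== PORT B =====
def assign_gpus_alt (available_gpus : String) (gpus_per_experiment : Int) (experiment_idx : Int) : String :=
  match pvParse_assign_gpus available_gpus with
  | none => ""  -- Python raises ValueError here; excluded by Pre_
  | some gpu_list =>
    let n : Int := gpu_list.length
    let start := PySem.Int.mod (experiment_idx * gpus_per_experiment) n
    let rotated := PySem.List.slice gpu_list (some start) none ++ PySem.List.slice gpu_list none (some start)
    let count := max gpus_per_experiment 0
    let q := PySem.Int.floordiv count n
    let r := PySem.Int.mod count n
    let assigned := PySem.List.pyRepeat rotated q ++ PySem.List.slice rotated none (some r)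
    PySem.Str.join "," (assigned.map PySem.Int.toStr)

-- ===== PRECONDITION & SPEC =====
-- Pre_ excludes exactly the inputs where int(g.strip()) raises ValueError (a comma-separated
-- piece that is not an integer literal); A returns on every other input.
def Pre_assign_gpus (available_gpus : String) (gpus_per_experiment : Int) (experiment_idx : Int) : Prop :=
  (((PySem.Str.split? available_gpus ",").getD []).all
    (fun g => (PySem.Int.ofStr? (PySem.Str.strip g)).isSome)) = true
instance (available_gpus : String) (gpus_per_experiment : Int) (experiment_idx : Int) : Decidable (Pre_assign_gpus available_gpus gpus_per_experiment experiment_idx) := by unfold Pre_assign_gpus; infer_instance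

def pvWitness_assign_gpus : String × Int × Int := ("0, 1, 2, 3", 2, 1)

def Spec_assign_gpus (available_gpus : String) (gpus_per_experiment : Int) (experiment_idx : Int) (out : String) : Prop := out = assign_gpus_alt available_gpus gpus_per_experiment experiment_idx
instance (available_gpus : String) (gpus_per_experiment : Int) (experiment_idx : Int) (out : String) : Decidable (Spec_assign_gpus available_gpus gpus_per_experiment experiment_idx out) := by unfold Spec_assign_gpus; infer_instance

-- ===== CLAIM (what is proved, stated in full; the proofs are below) =====
def Claim_equal_assign_gpus : Prop := ∀ (available_gpus : String) (gpus_per_experiment : Int) (experiment_idx : Int), Dom_assign_gpus available_gpus gpus_per_experiment experiment_idx → Pre_assign_gpus available_gpus gpus_per_experiment experiment_idx → Spec_assign_gpus available_gpus gpus_per_experiment experiment_idx (assign_gpus available_gpus gpus_per_experiment experiment_idx)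

-- ===== LEMMAS AND PROOFS =====

lemma rot_getD (gpu : List Int) (s k : Nat) (hs : s < gpu.length) (hk : k < gpu.length) :
    (gpu.drop s ++ gpu.take s).getD k 0 = gpu.getD ((s + k) % gpu.length) 0 := by
  simp only [List.getD_eq_getElem?_getD]
  by_cases h : k < gpu.length - s
  · rw [List.getElem?_append_left (by simp; omega), List.getElem?_drop,
      Nat.mod_eq_of_lt (by omega)]
  · have hmod : (s + k) % gpu.length = k - (gpu.length - s) := by
      rw [Nat.mod_eq_sub_mod (by omega), Nat.mod_eq_of_lt (by omega)]
      omega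
    rw [List.getElem?_append_right (by simp; omega), hmod]
    simp only [List.length_drop, List.getElem?_take]
    rw [if_pos (by omega)]

lemma head_chunk (gpu : List Int) (s : Nat) (hs : s < gpu.length) (m : Nat) (hm : m ≤ gpu.length) :
    (List.range m).map (fun k => gpu.getD ((s + k) % gpu.length) 0)
    = (gpu.drop s ++ gpu.take s).take m := by
  apply List.ext_getElem
  · simp; omega
  · intro k h1 h2
    simp only [List.getElem_map, List.getElem_range, List.getElem_take]
    rw [← rot_getD gpu s k hs (by simp at h1; omega)]
    rw [List.getD_eq_getElem]

lemma cyc_eq (gpu : List Int) (s : Nat) (hs : s < gpu.length) (m : Nat) :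
    (List.range m).map (fun k => gpu.getD ((s + k) % gpu.length) 0)
    = (List.replicate (m / gpu.length) (gpu.drop s ++ gpu.take s)).flatten
      ++ (gpu.drop s ++ gpu.take s).take (m % gpu.length) := by
  induction m using Nat.strong_induction_on with
  | _ m ih =>
    by_cases h : m < gpu.length
    · rw [Nat.div_eq_of_lt h, Nat.mod_eq_of_lt h]
      simpa using head_chunk gpu s hs m (by omega)
    · have hn : 0 < gpu.length := by omega
      have hm : m = (m - gpu.length) + gpu.length := by omega
      rw [hm, Nat.add_div_right _ hn, Nat.add_mod_right, Nat.add_comm (m - gpu.length) gpu.length,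
        List.range_add, List.map_append, List.map_map]
      have e2 : (List.range (m - gpu.length)).map
            ((fun k => gpu.getD ((s + k) % gpu.length) 0) ∘ (fun k => gpu.length + k))
          = (List.range (m - gpu.length)).map (fun k => gpu.getD ((s + k) % gpu.length) 0) := by
        apply List.map_congr_left
        intro k _
        simp only [Function.comp]
        rw [show s + (gpu.length + k) = gpu.length + (s + k) by omega, Nat.add_mod_left]
      rw [e2, head_chunk gpu s hs gpu.length le_rfl,
        List.take_of_length_le (by simp; omega), ih (m - gpu.length) (by omega),
        List.replicate_succ, List.flatten_cons]
      simp [List.append_assoc]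

lemma body_eq (gpu : List Int) (hne : gpu ≠ []) (g E : Int) :
    ((PySem.List.pyRange 0 g 1).foldl
      (fun acc i => acc ++ [PySem.List.pyGetD gpu
        (PySem.Int.mod (PySem.Int.mod E (gpu.length : Int) + i) (gpu.length : Int)) 0]) [])
    = PySem.List.pyRepeat
        (PySem.List.slice gpu (some (PySem.Int.mod E (gpu.length : Int))) none
          ++ PySem.List.slice gpu none (some (PySem.Int.mod E (gpu.length : Int))))
        (PySem.Int.floordiv (max g 0) (gpu.length : Int))
      ++ PySem.List.slice
        (PySem.List.slice gpu (some (PySem.Int.mod E (gpu.length : Int))) none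
          ++ PySem.List.slice gpu none (some (PySem.Int.mod E (gpu.length : Int))))
        none (some (PySem.Int.mod (max g 0) (gpu.length : Int))) := by
  have hn : 0 < gpu.length := List.length_pos_of_ne_nil hne
  have hni : (0 : Int) < (gpu.length : Int) := by exact_mod_cast hn
  have h0 : 0 ≤ PySem.Int.mod E (gpu.length : Int) := PySem.Int.mod_nonneg E hni
  have h1 : PySem.Int.mod E (gpu.length : Int) < (gpu.length : Int) := PySem.Int.mod_lt E hni
  set s : Nat := (PySem.Int.mod E (gpu.length : Int)).toNat with hsdef
  have hse : PySem.Int.mod E (gpu.length : Int) = (s : Int) := (Int.toNat_of_nonneg h0).symm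
  have hs : s < gpu.length := by omega
  set m : Nat := g.toNat with hmdef
  have hme : max g 0 = (m : Int) := (Int.ofNat_toNat g).symm
  rw [hse, hme, PySem.List.foldl_append_singleton_eq_map, PySem.List.pyRange_one,
    PySem.List.slice_from_natCast, PySem.List.slice_to_natCast,
    PySem.Int.floordiv_natCast, PySem.Int.mod_natCast, PySem.List.slice_to_natCast,
    List.map_map]
  have hmm : (g - 0).toNat = m := by omega
  rw [hmm]
  have e1 : (List.range m).map ((fun i => PySem.List.pyGetD gpu
        (PySem.Int.mod ((s : Int) + i) (gpu.length : Int)) 0) ∘ (fun k : Nat => (0 : Int) + (k : Int)))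
      = (List.range m).map (fun k => gpu.getD ((s + k) % gpu.length) 0) := by
    apply List.map_congr_left
    intro k _
    simp only [Function.comp]
    rw [show (s : Int) + ((0 : Int) + (k : Int)) = ((s + k : Nat) : Int) by push_cast; ring,
      PySem.Int.mod_natCast, PySem.List.pyGetD_natCast]
  rw [e1, cyc_eq gpu s hs m]
  simp only [PySem.List.pyRepeat, Int.toNat_natCast, List.nil_append]

lemma go_ne_nil (sep : List Char) : ∀ fuel l cur acc, PySem.Chars.splitOn.go sep fuel l cur acc ≠ [] := by
  intro fuel
  induction fuel with
  | zero => intro l cur acc; simp [PySem.Chars.splitOn.go]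
  | succ f ih =>
    intro l cur acc
    cases l with
    | nil => simp [PySem.Chars.splitOn.go]
    | cons c rest =>
      rw [PySem.Chars.splitOn.go]
      split
      · exact ih _ _ _
      · exact ih _ _ _

lemma pieces_ne_nil (ag : String) : (PySem.Str.split? ag ",").getD [] ≠ [] := by
  simp [PySem.Str.split?, PySem.Chars.split?]
  exact go_ne_nil [','] _ ag.toList [] []

lemma parse_ne_nil (ag : String) (gpu : List Int) (hp : pvParse_assign_gpus ag = some gpu) : gpu ≠ [] := by
  intro h
  subst h
  unfold pvParse_assign_gpus at hp
  obtain ⟨a, l, hps⟩ := List.exists_cons_of_ne_nil (pieces_ne_nil ag)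
  rw [hps] at hp
  simp [List.mapM_cons] at hp
  cases h1 : PySem.Int.ofStr? (PySem.Str.strip a) with
  | none => rw [h1] at hp; simp at hp
  | some v =>
    rw [h1] at hp
    cases h2 : List.mapM (fun g => PySem.Int.ofStr? (PySem.Str.strip g)) l with
    | none => rw [h2] at hp; simp at hp
    | some vs => rw [h2] at hp; simp at hp

-- ===== VERDICT (by name: the statement is the Claim_ definition above) =====
theorem assign_gpus_spec : Claim_equal_assign_gpus := by
  intro available_gpus gpus_per_experiment experiment_idx _ _
  unfold Spec_assign_gpus assign_gpus assign_gpus_alt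
  cases hp : pvParse_assign_gpus available_gpus with
  | none => rfl
  | some gpu =>
    exact congrArg (fun l => PySem.Str.join "," (l.map PySem.Int.toStr))
      (body_eq gpu (parse_ne_nil available_gpus gpu hp) gpus_per_experiment
        (experiment_idx * gpus_per_experiment))
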